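-- pv_equiv track=rewrite | github.com/unikraft/loupe | misc-artifacts/implementation-timeline/top-syscalls.py | get_top_all
-- ===== SOURCE A (Python) =====
-- def get_top_all(data, top):
--     res = []
--     already_seen = []
--
--     for os in data:
--         for syscall in sorted(data[os], key=data[os].get)[0:top]:
--             if syscall not in already_seen:
--                 already_seen.append(syscall)
--                 present = True
--                 for os2 in data:
--                     if os2 != os and syscall not in sorted(data[os2], key=data[os2].get)[0:top]:
--                         present = False
--                         break
--                 if present:
--                     res.append(syscall)
--     return res
-- ===== SOURCE B (Python) =====
-- def get_top_all(data, top):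
--     # tabulate each OS's top-k once, tally, then filter the first OS's top-k list
--     tops = [sorted(d, key=d.get)[0:top] for d in data.values()]
--     counts = {}
--     for t in tops:
--         for s in t:
--             counts[s] = counts.get(s, 0) + 1
--     if not tops:
--         return []
--     n = len(data)
--     return [s for s in tops[0] if counts[s] == n]
-- ===== Notes on version B (the rewrite author's own statement) =====
-- stated objective: faster
-- what changed: B computes each OS's top-k list once, tallies every syscall's number of appearances in a dict, and filters the first OS's top-k by tally == len(data), replacing A's per-candidate re-sorting of every OS's dict inside a nested scan.
import Mathlib
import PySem

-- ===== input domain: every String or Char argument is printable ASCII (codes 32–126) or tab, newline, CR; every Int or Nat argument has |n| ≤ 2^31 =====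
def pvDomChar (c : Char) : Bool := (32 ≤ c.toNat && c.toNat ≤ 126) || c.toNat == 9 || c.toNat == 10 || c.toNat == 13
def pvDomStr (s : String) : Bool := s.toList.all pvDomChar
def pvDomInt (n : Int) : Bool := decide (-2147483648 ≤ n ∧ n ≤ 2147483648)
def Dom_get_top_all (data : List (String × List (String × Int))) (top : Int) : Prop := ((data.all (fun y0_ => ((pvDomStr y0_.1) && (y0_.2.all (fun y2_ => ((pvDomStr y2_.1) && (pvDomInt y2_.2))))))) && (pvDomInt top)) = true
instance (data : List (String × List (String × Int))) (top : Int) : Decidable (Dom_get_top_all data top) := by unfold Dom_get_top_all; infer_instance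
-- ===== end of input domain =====

-- B computes each OS's top-k once, tallies appearances in a dict, and filters the
-- first OS's top-k by tally = len(data), replacing A's per-candidate re-sorting scan (faster).


-- ===== PORT A =====
-- sorted(data[os], key=data[os].get)[0:top] : keys of the dict d, sorted (stably) by value, first `top`
def pvTopA (d : List (String × Int)) (top : Int) : List String :=
  PySem.List.slice (PySem.List.sorted (d.map Prod.fst) (fun s => PySem.Dict.getD ⟨d⟩ s 0)) (some 0) (some top)

-- under Pre_ (nodup keys) 'for os in data: … data[os] …' is iteration over the (key, value) items
def get_top_all (data : List (String × List (String × Int))) (top : Int) : List String :=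
  (data.foldl (fun (st : List String × List String) osd =>
    (pvTopA osd.2 top).foldl (fun st2 syscall =>
      if st2.2.contains syscall then st2
      else
        let seen := st2.2 ++ [syscall]
        -- 'for os2 in data: if os2 != os and syscall not in top(os2): present = False; break'
        let present := data.all (fun osd2 => osd2.1 == osd.1 || (pvTopA osd2.2 top).contains syscall)
        if present then (st2.1 ++ [syscall], seen) else (st2.1, seen)) st) ([], [])).1

-- ===== PORT B =====
def pvTopB (d : List (String × Int)) (top : Int) : List String :=
  PySem.List.slice (PySem.List.sorted (d.map Prod.fst) (fun s => PySem.Dict.getD ⟨d⟩ s 0)) (some 0) (some top)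

def get_top_all_alt (data : List (String × List (String × Int))) (top : Int) : List String :=
  let tops := data.map (fun p => pvTopB p.2 top)
  let counts := tops.foldl (fun c t =>
    t.foldl (fun (c : PySem.Dict String Int) s => c.insert s (c.getD s 0 + 1)) c) PySem.Dict.empty
  match tops with
  | [] => []
  | t0 :: _ => t0.filter (fun s => counts.getD s 0 == (data.length : Int))

-- ===== PRECONDITION & SPEC =====
-- Pre_ excludes only association lists with duplicate keys (outer or inner): those do not
-- encode a Python dict, so A is not defined on them; every real dict input satisfies Pre_.
def Pre_get_top_all (data : List (String × List (String × Int))) (top : Int) : Prop :=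
  (data.map Prod.fst).Nodup ∧ ∀ p ∈ data, (p.2.map Prod.fst).Nodup
instance (data : List (String × List (String × Int))) (top : Int) : Decidable (Pre_get_top_all data top) := by unfold Pre_get_top_all; infer_instance

def pvWitness_get_top_all : (List (String × List (String × Int))) × Int :=
  ([("linux", [("read", 5), ("write", 3)]), ("bsd", [("write", 1), ("open", 9)])], 2)

def Spec_get_top_all (data : List (String × List (String × Int))) (top : Int) (out : List String) : Prop := out = get_top_all_alt data top
instance (data : List (String × List (String × Int))) (top : Int) (out : List String) : Decidable (Spec_get_top_all data top out) := by unfold Spec_get_top_all; infer_instance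

-- ===== CLAIM (what is proved, stated in full; the proofs are below) =====
def Claim_equal_get_top_all : Prop := ∀ (data : List (String × List (String × Int))) (top : Int), Dom_get_top_all data top → Pre_get_top_all data top → Spec_get_top_all data top (get_top_all data top)

-- ===== LEMMAS AND PROOFS =====

-- a slice xs[0:top] is a prefix (a take), hence Nodup is preserved
lemma pvSlice_zero_eq_take (xs : List String) (top : Int) :
    ∃ k, PySem.List.slice xs (some 0) (some top) = xs.take k := by
  rcases (by omega : 0 ≤ top ∨ top < 0) with h | h
  · exact ⟨top.toNat, by rw [PySem.List.slice_toNat xs (le_refl 0) h]; simp⟩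
  · obtain ⟨k, hk0, hk⟩ : ∃ k : Nat, 0 < k ∧ top = -(k : Int) :=
      ⟨(-top).toNat, by omega, by omega⟩
    refine ⟨xs.length - k, ?_⟩
    rw [hk]
    simp only [PySem.List.slice_zero_start]
    exact PySem.List.slice_to_neg_natCast xs k hk0

lemma pvTopA_nodup (d : List (String × Int)) (top : Int) (h : (d.map Prod.fst).Nodup) :
    (pvTopA d top).Nodup := by
  obtain ⟨k, hk⟩ := pvSlice_zero_eq_take (PySem.List.sorted (d.map Prod.fst) (fun s => PySem.Dict.getD ⟨d⟩ s 0)) top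
  unfold pvTopA
  rw [hk]
  exact ((PySem.List.sorted_perm _ _ _).nodup_iff.mpr h).take

-- the nested counting fold: final tally of s = total count of s over all top lists
lemma pvCounts_getD (tops : List (List String)) (c : PySem.Dict String Int) (s : String) :
    (tops.foldl (fun c t =>
      t.foldl (fun (c : PySem.Dict String Int) s => c.insert s (c.getD s 0 + 1)) c) c).getD s 0
    = c.getD s 0 + ((tops.map (fun t => (t.count s : Int))).sum) := by
  induction tops generalizing c with
  | nil => simp
  | cons t rest ih =>
    simp only [List.foldl_cons, List.map_cons, List.sum_cons]
    rw [ih, PySem.Dict.getD_foldl_insert_add_one]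
    ring

lemma pvSum_count_le (tops : List (List String)) (s : String) (h : ∀ t ∈ tops, t.Nodup) :
    (tops.map (fun t => (t.count s : Int))).sum ≤ tops.length := by
  induction tops with
  | nil => simp
  | cons t rest ih =>
    have h1 : t.count s ≤ 1 := List.nodup_iff_count_le_one.mp (h t (by simp)) s
    have h2 := ih (fun u hu => h u (by simp [hu]))
    simp only [List.map_cons, List.sum_cons, List.length_cons]
    push_cast
    omega

lemma pvSum_count_eq_iff (tops : List (List String)) (s : String) (h : ∀ t ∈ tops, t.Nodup) :
    ((tops.map (fun t => (t.count s : Int))).sum = tops.length) ↔ ∀ t ∈ tops, s ∈ t := by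
  induction tops with
  | nil => simp
  | cons t rest ih =>
    have h1 : t.count s ≤ 1 := List.nodup_iff_count_le_one.mp (h t (by simp)) s
    have h2 := pvSum_count_le rest s (fun u hu => h u (by simp [hu]))
    have h3 := ih (fun u hu => h u (by simp [hu]))
    simp only [List.map_cons, List.sum_cons, List.length_cons, List.mem_cons]
    constructor
    · intro he
      have hc : t.count s = 1 := by push_cast at he ⊢; omega
      have hr : ((rest.map (fun t => (t.count s : Int))).sum = rest.length) := by
        push_cast at he ⊢; omega
      refine fun u hu => ?_
      rcases hu with rfl | hu
      · exact List.count_pos_iff.mp (by omega)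
      · exact h3.mp hr u hu
    · intro hall
      have hc : t.count s = 1 := by
        have := List.count_pos_iff.mpr (hall t (Or.inl rfl)); omega
      have hr := h3.mpr (fun u hu => hall u (Or.inr hu))
      push_cast
      push_cast at hr
      omega

-- characterisation of A's inner loop over one top list, for an arbitrary 'present' predicate
lemma pvInner_char (pres : String → Bool) (t : List String) (ht : t.Nodup) :
    ∀ res seen : List String,
    t.foldl (fun (st2 : List String × List String) syscall =>
      if st2.2.contains syscall then st2
      else
        let seen := st2.2 ++ [syscall]
        let present := pres syscall
        if present then (st2.1 ++ [syscall], seen) else (st2.1, seen)) (res, seen)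
    = (res ++ t.filter (fun s => !seen.contains s && pres s),
       seen ++ t.filter (fun s => !seen.contains s)) := by
  induction t with
  | nil => simp
  | cons s t ih =>
    intro res seen
    have hs : s ∉ t := (List.nodup_cons.mp ht).1
    have ht' : t.Nodup := (List.nodup_cons.mp ht).2
    have hcongr : ∀ (u : String), u ∈ t →
        ((seen ++ [s]).contains u) = (seen.contains u) := by
      intro u hu
      have : u ≠ s := fun h => hs (h ▸ hu)
      simp [List.contains_eq_mem, this]
    have hfc : ∀ seen' : List String, (∀ u ∈ t, seen'.contains u = seen.contains u) →
        List.filter (fun u => !seen'.contains u && pres u) t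
          = List.filter (fun u => !seen.contains u && pres u) t ∧
        List.filter (fun u => !seen'.contains u) t
          = List.filter (fun u => !seen.contains u) t := by
      intro seen' h5
      constructor
      · exact List.filter_congr (fun u hu => by rw [h5 u hu])
      · exact List.filter_congr (fun u hu => by rw [h5 u hu])
    simp only [List.foldl_cons, List.filter_cons]
    by_cases hm : seen.contains s = true
    · have hm' : s ∈ seen := by simpa using hm
      rw [if_pos hm, ih ht' res seen]
      simp [hm']
    · have hm' : s ∉ seen := by simpa using hm
      rw [if_neg hm]
      by_cases hp : pres s = true
      · rw [if_pos hp, ih ht' (res ++ [s]) (seen ++ [s]),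
            (hfc _ hcongr).1, (hfc _ hcongr).2]
        simp [hm', hp]
      · rw [if_neg hp, ih ht' res (seen ++ [s]),
            (hfc _ hcongr).1, (hfc _ hcongr).2]
        simp [hm', hp]

lemma pvAll_congr {α : Type} (l : List α) (f g : α → Bool) (h : ∀ x ∈ l, f x = g x) :
    l.all f = l.all g := by
  induction l with
  | nil => rfl
  | cons x l ih =>
    simp only [List.all_cons, h x (by simp), ih (fun y hy => h y (by simp [hy]))]

-- later OSes add nothing: any syscall present in every top list is already in 'seen' (it is in os0's top)
lemma pvRest_no_add (dataAll : List (String × List (String × Int))) (top : Int)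
    (os0 : String) (d0 : List (String × Int))
    (hmem : (os0, d0) ∈ dataAll)
    (hinner : ∀ p ∈ dataAll, (p.2.map Prod.fst).Nodup) :
    ∀ (rest : List (String × List (String × Int))),
      (∀ p ∈ rest, p ∈ dataAll ∧ p.1 ≠ os0) →
    ∀ (res seen : List String), (∀ s ∈ pvTopA d0 top, s ∈ seen) →
    (rest.foldl (fun (st : List String × List String) osd =>
      (pvTopA osd.2 top).foldl (fun st2 syscall =>
        if st2.2.contains syscall then st2
        else
          let seen := st2.2 ++ [syscall]
          let present := dataAll.all (fun osd2 => osd2.1 == osd.1 || (pvTopA osd2.2 top).contains syscall)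
          if present then (st2.1 ++ [syscall], seen) else (st2.1, seen)) st) (res, seen)).1 = res := by
  intro rest
  induction rest with
  | nil => intro _ res seen _; rfl
  | cons q rest ih =>
    intro hq res seen hseen
    obtain ⟨hqmem, hqne⟩ := hq q (by simp)
    simp only [List.foldl_cons]
    rw [pvInner_char _ _ (pvTopA_nodup _ _ (hinner q hqmem)) res seen]
    have hfilt : (pvTopA q.2 top).filter (fun s => !seen.contains s &&
        dataAll.all (fun osd2 => osd2.1 == q.1 || (pvTopA osd2.2 top).contains s)) = [] := by
      rw [List.filter_eq_nil_iff]
      intro s hsmem hcond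
      simp only [Bool.and_eq_true, Bool.not_eq_eq_eq_not, Bool.not_true, List.all_eq_true] at hcond
      obtain ⟨hc1, hc2⟩ := hcond
      have h3 := hc2 (os0, d0) hmem
      simp only [beq_iff_eq, Bool.or_eq_true] at h3
      rcases h3 with h3 | h3
      · exact hqne h3.symm
      · have : s ∈ seen := hseen s (by simpa using h3)
        simp [this] at hc1
    rw [hfilt]
    simp only [List.append_nil]
    apply ih (fun p hp => hq p (by simp [hp]))
    intro s hs
    exact List.mem_append_left _ (hseen s hs)

-- A's result on nonempty data: os0's top list filtered by membership in every OS's top list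
lemma pvA_char (os0 : String) (d0 : List (String × Int))
    (rest : List (String × List (String × Int))) (top : Int)
    (hkeys : (((os0, d0) :: rest).map Prod.fst).Nodup)
    (hinner : ∀ p ∈ (os0, d0) :: rest, (p.2.map Prod.fst).Nodup) :
    get_top_all ((os0, d0) :: rest) top
      = (pvTopA d0 top).filter
          (fun s => ((os0, d0) :: rest).all (fun p => (pvTopA p.2 top).contains s)) := by
  have hT0 : (pvTopA d0 top).Nodup := pvTopA_nodup _ _ (hinner (os0, d0) (by simp))
  have hsub : ∀ p ∈ rest, p ∈ (os0, d0) :: rest ∧ p.1 ≠ os0 := by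
    intro p hp
    refine ⟨List.mem_cons_of_mem _ hp, ?_⟩
    intro h
    have hnotin : os0 ∉ rest.map Prod.fst := by
      simp only [List.map_cons, List.nodup_cons] at hkeys
      exact hkeys.1
    exact hnotin (h ▸ List.mem_map_of_mem hp)
  unfold get_top_all
  simp only [List.foldl_cons]
  rw [pvInner_char _ _ hT0 [] []]
  simp only [List.nil_append, List.contains_nil, Bool.not_false, Bool.true_and,
    List.filter_true]
  rw [pvRest_no_add ((os0, d0) :: rest) top os0 d0 (by simp) hinner rest hsub _ _
       (fun s hs => hs)]
  apply List.filter_congr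
  intro s hs
  have hcs : (pvTopA d0 top).contains s = true := by simpa using hs
  simp only [List.all_cons, beq_self_eq_true, Bool.true_or, Bool.true_and, hcs]
  apply pvAll_congr
  intro p hp
  have hne : p.1 ≠ os0 := (hsub p hp).2
  simp [beq_iff_eq, hne]

-- ===== VERDICT (by name: the statement is the Claim_ definition above) =====
set_option maxHeartbeats 1600000 in
theorem get_top_all_spec : Claim_equal_get_top_all := by
  intro data top _ hpre
  unfold Spec_get_top_all
  obtain ⟨hkeys, hinner⟩ := hpre
  cases data with
  | nil => rfl
  | cons hd rest =>
    obtain ⟨os0, d0⟩ := hd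
    rw [pvA_char os0 d0 rest top hkeys hinner]
    have hBA : pvTopB = pvTopA := rfl
    have hRHS : get_top_all_alt ((os0, d0) :: rest) top
        = (pvTopA d0 top).filter (fun s =>
            (((pvTopA d0 top) :: rest.map (fun p => pvTopA p.2 top)).foldl
              (fun c t => t.foldl (fun (c : PySem.Dict String Int) s =>
                c.insert s (c.getD s 0 + 1)) c)
              PySem.Dict.empty).getD s 0 == ((((os0, d0) :: rest).length : Nat) : Int)) := by
      unfold get_top_all_alt
      simp only [List.map_cons, hBA]
    rw [hRHS]
    have hnds : ∀ t ∈ (pvTopA d0 top) :: rest.map (fun p => pvTopA p.2 top), t.Nodup := by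
      intro t ht
      rcases List.mem_cons.mp ht with rfl | ht'
      · exact pvTopA_nodup _ _ (hinner (os0, d0) (by simp))
      · obtain ⟨p, hp, rfl⟩ := List.mem_map.mp ht'
        exact pvTopA_nodup _ _ (hinner p (by simp [hp]))
    apply List.filter_congr
    intro s hs
    have hiff := pvSum_count_eq_iff _ s hnds
    have lhs_iff : (((os0, d0) :: rest).all (fun p => (pvTopA p.2 top).contains s) = true)
        ↔ ∀ t ∈ (pvTopA d0 top) :: rest.map (fun p => pvTopA p.2 top), s ∈ t := by
      simp only [List.all_eq_true]
      constructor
      · intro h t ht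
        rcases List.mem_cons.mp ht with rfl | ht'
        · simpa using h (os0, d0) (by simp)
        · obtain ⟨p, hp, rfl⟩ := List.mem_map.mp ht'
          simpa using h p (by simp [hp])
      · intro h p hp
        rcases List.mem_cons.mp hp with rfl | hp'
        · simpa using h (pvTopA d0 top) (by simp)
        · have : pvTopA p.2 top ∈ (pvTopA d0 top) :: rest.map (fun q => pvTopA q.2 top) := by
            exact List.mem_cons_of_mem _ (List.mem_map_of_mem hp')
          simpa using h _ this
    rw [Bool.eq_iff_iff, lhs_iff, pvCounts_getD, PySem.Dict.getD_empty, zero_add, beq_iff_eq]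
    have hlen : ((((os0, d0) :: rest).length : Nat) : Int)
        = (((pvTopA d0 top :: rest.map (fun p => pvTopA p.2 top)).length : Nat) : Int) := by simp
    rw [hlen]
    exact hiff.symm
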